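-- pv_equiv track=rewrite | github.com/ursomniac/skytour | skytour/skytour/apps/stars/utils.py | gridify
-- ===== SOURCE A (Python) =====
-- import math, re
--
-- def gridify(x, nc, blank=None):
--     nr = math.ceil(len(x)/nc)
--     y = [blank] * nr * nc
--     for i in range(nc):
--         for j in range(nr):
--             xindex = i * nr + j
--             yindex = j * nc + i
--             if xindex < len(x):
--                 y[yindex] = x[xindex]
--     return y
-- ===== SOURCE B (Python) =====
-- import math
-- from itertools import zip_longest
--
-- def gridify(x, nc, blank=None):
--     nr = math.ceil(len(x)/nc)
--     columns = [x[i*nr:(i+1)*nr] for i in range(nc)]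
--     return [v for row in zip_longest(*columns, fillvalue=blank) for v in row]
-- ===== Notes on version B (the rewrite author's own statement) =====
-- stated objective: idiomatic
-- what changed: B represents the grid as nc column slices and reads it row-by-row with itertools.zip_longest(fillvalue=blank), replacing A's preallocated flat buffer and nested index-arithmetic writes with a bounds check.
-- outside the precondition, e.g. on gridify([1, 2], 0, None): A raises ZeroDivisionError, B raises ZeroDivisionError
import Mathlib
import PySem

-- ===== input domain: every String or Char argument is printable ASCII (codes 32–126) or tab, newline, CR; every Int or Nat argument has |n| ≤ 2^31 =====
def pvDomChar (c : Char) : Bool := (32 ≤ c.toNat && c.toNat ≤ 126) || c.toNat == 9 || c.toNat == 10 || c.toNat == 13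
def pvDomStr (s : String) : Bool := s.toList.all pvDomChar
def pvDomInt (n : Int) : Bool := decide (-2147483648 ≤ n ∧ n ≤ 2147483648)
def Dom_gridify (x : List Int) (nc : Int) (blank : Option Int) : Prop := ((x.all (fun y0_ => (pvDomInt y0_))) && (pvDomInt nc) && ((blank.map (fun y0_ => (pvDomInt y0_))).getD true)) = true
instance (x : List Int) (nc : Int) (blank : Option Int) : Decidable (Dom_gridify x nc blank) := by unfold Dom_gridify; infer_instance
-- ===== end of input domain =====

-- B reshapes via column slices + a zip_longest transpose instead of A's preallocated buffer with nested index-arithmetic writes; return values proved equal for nc ≠ 0.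

-- ===== PORT A =====
-- math.ceil(len(x)/nc) ported as ceiling division -((-len) // nc): exact here, since the float
-- quotient of these machine-sized ints is correctly rounded and cannot cross an integer.
def gridify (x : List Int) (nc : Int) (blank : Option Int) : List (Option Int) :=
  let nr : Int := -(PySem.Int.floordiv (-(x.length : Int)) nc)
  -- y = [blank] * nr * nc
  let y : List (Option Int) := (List.replicate nc.toNat (List.replicate nr.toNat blank)).flatten
  (PySem.List.pyRange 0 nc 1).foldl (fun y i =>
    (PySem.List.pyRange 0 nr 1).foldl (fun y j =>
      let xindex := i * nr + j
      let yindex := j * nc + i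
      if xindex < (x.length : Int) then
        -- y[yindex] = x[xindex]; both indices are provably in range whenever this line runs
        y.set yindex.toNat (PySem.List.pyGet? x xindex)
      else y) y) y

-- ===== PORT B =====
-- termination measure fact for the zip_longest recursion (cited by decreasing_by)
theorem pvSumTailLt (cols : List (List Int)) (h : ¬ cols.all List.isEmpty = true) :
    ((cols.map List.tail).map List.length).sum < (cols.map List.length).sum := by
  induction cols with
  | nil => simp at h
  | cons c cs ih =>
    simp only [List.all_cons, Bool.and_eq_true] at h
    by_cases hc : c.isEmpty = true
    · have hcs : ¬ cs.all List.isEmpty = true := by tauto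
      have := ih hcs
      cases c <;> simp_all
    · have hlt : c.tail.length < c.length := by cases c <;> simp_all
      have hle : ((cs.map List.tail).map List.length).sum ≤ (cs.map List.length).sum := by
        clear h ih; induction cs with
        | nil => simp
        | cons d ds ihd => simpa using Nat.add_le_add (by cases d <;> simp) ihd
      simp only [List.map_cons, List.sum_cons]
      omega

-- port of itertools.zip_longest(*cols, fillvalue=blank) with each produced row concatenated
def zipLongestFlat (blank : Option Int) (cols : List (List Int)) : List (Option Int) :=
  if h : cols.all List.isEmpty then []
  else (cols.map (fun c => match c with | [] => blank | a :: _ => some a))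
       ++ zipLongestFlat blank (cols.map List.tail)
termination_by (cols.map List.length).sum
decreasing_by simpa using pvSumTailLt cols h

def gridify_alt (x : List Int) (nc : Int) (blank : Option Int) : List (Option Int) :=
  let nr : Int := -(PySem.Int.floordiv (-(x.length : Int)) nc)
  let columns := (PySem.List.pyRange 0 nc 1).map
    (fun i => PySem.List.slice x (some (i * nr)) (some ((i + 1) * nr)))
  zipLongestFlat blank columns

-- ===== PRECONDITION & SPEC =====
-- Pre_ excludes exactly nc = 0, where A raises ZeroDivisionError (math.ceil(len(x)/0)); B raises there too.
def Pre_gridify (x : List Int) (nc : Int) (blank : Option Int) : Prop := nc ≠ 0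
instance (x : List Int) (nc : Int) (blank : Option Int) : Decidable (Pre_gridify x nc blank) := by unfold Pre_gridify; infer_instance
def pvWitness_gridify : List Int × Int × Option Int := ([1, 2, 3, 4, 5], 2, none)

def Spec_gridify (x : List Int) (nc : Int) (blank : Option Int) (out : List (Option Int)) : Prop := out = gridify_alt x nc blank
instance (x : List Int) (nc : Int) (blank : Option Int) (out : List (Option Int)) : Decidable (Spec_gridify x nc blank out) := by unfold Spec_gridify; infer_instance

-- ===== CLAIM (what is proved, stated in full; the proofs are below) =====
def Claim_equal_gridify : Prop := ∀ (x : List Int) (nc : Int) (blank : Option Int), Dom_gridify x nc blank → Pre_gridify x nc blank → Spec_gridify x nc blank (gridify x nc blank)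

-- ===== LEMMAS AND PROOFS =====

-- the row-major grid both programs produce (proof target; used by the proofs only)
def gridTarget (x : List Int) (blank : Option Int) (R C : Nat) : List (Option Int) :=
  (List.range R).flatMap (fun j =>
    (List.range C).map (fun i => if i * R + j < x.length then x[i * R + j]? else blank))

theorem idx_lt {i j C R : Nat} (hi : i < C) (hj : j < R) : j * C + i < R * C :=
  calc j * C + i < j * C + C := by omega
    _ = (j + 1) * C := by ring
    _ ≤ R * C := Nat.mul_le_mul_right C hj

theorem idx_inj {i i' j j' C : Nat} (hi : i < C) (hi' : i' < C) :
    j * C + i = j' * C + i' ↔ j = j' ∧ i = i' := by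
  constructor
  · intro h
    have h1 : (j * C + i) % C = (j' * C + i') % C := by rw [h]
    rw [Nat.mul_add_mod', Nat.mul_add_mod', Nat.mod_eq_of_lt hi, Nat.mod_eq_of_lt hi'] at h1
    subst h1
    have h2 : j * C = j' * C := by omega
    exact ⟨Nat.eq_of_mul_eq_mul_right (by omega) h2, rfl⟩
  · rintro ⟨rfl, rfl⟩; rfl

theorem rows_length {α : Type} (g : Nat → Nat → α) (r C : Nat) :
    ((List.range r).flatMap (fun j => (List.range C).map (fun i => g i j))).length = r * C := by
  induction r with
  | zero => simp
  | succ r ih =>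
    rw [List.range_succ, List.flatMap_append]
    simp only [List.length_append, ih, List.flatMap_cons, List.flatMap_nil,
      List.append_nil, List.length_map, List.length_range]
    ring

theorem rows_getElem {α : Type} (g : Nat → Nat → α) {r C i j : Nat} (hi : i < C) (hj : j < r) :
    ((List.range r).flatMap (fun j => (List.range C).map (fun i => g i j)))[j * C + i]? =
      some (g i j) := by
  induction r with
  | zero => omega
  | succ r ih =>
    rw [List.range_succ, List.flatMap_append]
    rcases Nat.lt_or_ge j r with h | h
    · rw [List.getElem?_append_left (by rw [rows_length]; exact idx_lt hi h)]
      exact ih h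
    · have hj' : j = r := by omega
      subst hj'
      rw [List.getElem?_append_right (by rw [rows_length]; omega)]
      rw [rows_length]
      have hsub : j * C + i - j * C = i := by omega
      rw [hsub]
      simp [List.getElem?_range hi]

-- facts about nr = math.ceil(len(x)/nc) for nc > 0
theorem ceil_facts (x : List Int) (nc : Int) (h : 0 < nc) :
    ∃ R C : Nat, (R : Int) = -(PySem.Int.floordiv (-(x.length : Int)) nc) ∧ (C : Int) = nc ∧
      x.length ≤ R * C ∧ 0 < C ∧ (0 < R → R ≤ x.length) := by
  have hiff : ((-(PySem.Int.floordiv (-(x.length : Int)) nc)) - 1) * nc < (x.length : Int) ∧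
      (x.length : Int) ≤ (-(PySem.Int.floordiv (-(x.length : Int)) nc)) * nc :=
    (PySem.Int.neg_floordiv_neg_eq_iff_of_pos h).mp rfl
  set nr : Int := -(PySem.Int.floordiv (-(x.length : Int)) nc) with hnrdef
  obtain ⟨h1, h2⟩ := hiff
  have hx0 : (0 : Int) ≤ (x.length : Int) := Int.natCast_nonneg _
  have hnr0 : 0 ≤ nr := by
    by_contra hneg
    rw [Int.not_le] at hneg
    have : nr * nc < 0 := mul_neg_of_neg_of_pos hneg h
    linarith
  refine ⟨nr.toNat, nc.toNat, ?_, ?_, ?_, ?_, ?_⟩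
  · rw [Int.toNat_of_nonneg hnr0]
  · rw [Int.toNat_of_nonneg h.le]
  · have hcast : (x.length : Int) ≤ ((nr.toNat * nc.toNat : Nat) : Int) := by
      push_cast
      rw [Int.toNat_of_nonneg hnr0, Int.toNat_of_nonneg h.le]
      exact h2
    exact_mod_cast hcast
  · omega
  · intro hR
    have hnr1 : (1 : Int) ≤ nr := by omega
    have hle : nr - 1 ≤ (nr - 1) * nc := le_mul_of_one_le_right (by omega) (by omega)
    have hlt : nr - 1 < (x.length : Int) := lt_of_le_of_lt hle h1
    omega

theorem gridTarget_length (x : List Int) (blank : Option Int) (R C : Nat) :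
    (gridTarget x blank R C).length = R * C :=
  rows_length (fun i j => if i * R + j < x.length then x[i * R + j]? else blank) R C

theorem gridTarget_getElem (x : List Int) (blank : Option Int) (R C : Nat)
    {i j : Nat} (hi : i < C) (hj : j < R) :
    (gridTarget x blank R C)[j * C + i]? =
      some (if i * R + j < x.length then x[i * R + j]? else blank) :=
  rows_getElem (fun i j => if i * R + j < x.length then x[i * R + j]? else blank) hi hj

-- ===== A-side =====

theorem foldl_length_eq {α β : Type} (f : List α → β → List α) (l : List β) (init : List α)
    (h : ∀ y b, (f y b).length = y.length) : (l.foldl f init).length = init.length := by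
  induction l generalizing init with
  | nil => rfl
  | cons b bs ih => rw [List.foldl_cons, ih, h]

theorem flatten_rep {α : Type} (m r : Nat) (a : α) :
    (List.replicate m (List.replicate r a)).flatten = List.replicate (m * r) a := by
  induction m with
  | zero => simp
  | succ m ih =>
    rw [List.replicate_succ, List.flatten_cons, ih,
      show (m + 1) * r = r + m * r by ring, List.replicate_add]

-- nested Nat-indexed form of A's loops
theorem gridify_pos (x : List Int) (nc : Int) (blank : Option Int) (h : 0 < nc)
    (R C : Nat) (hR : (R : Int) = -(PySem.Int.floordiv (-(x.length : Int)) nc))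
    (hC : (C : Int) = nc) :
    gridify x nc blank =
      (List.range C).foldl
        (fun y i => (List.range R).foldl
          (fun y j => if i * R + j < x.length then y.set (j * C + i) x[i * R + j]? else y) y)
        (List.replicate (C * R) blank) := by
  simp only [gridify]
  rw [← hR, ← hC, PySem.List.pyRange_one 0 ((C : Int))]
  have e0 : (((C : Int)) - 0).toNat = C := by simp
  rw [e0, List.foldl_map, Int.toNat_natCast, Int.toNat_natCast, flatten_rep]
  apply PySem.List.foldl_congr_mem
  intro acc k hk
  rw [PySem.List.pyRange_one 0 ((R : Int))]
  have e0R : (((R : Int)) - 0).toNat = R := by simp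
  rw [e0R, List.foldl_map]
  apply PySem.List.foldl_congr_mem
  intro acc2 m hm
  have e1 : ((0 : Int) + (k : Int)) * (R : Int) + ((0 : Int) + (m : Int)) = ((k * R + m : Nat) : Int) := by
    push_cast; ring
  have e2 : ((0 : Int) + (m : Int)) * (C : Int) + ((0 : Int) + (k : Int)) = ((m * C + k : Nat) : Int) := by
    push_cast; ring
  rw [e1, e2, Int.toNat_natCast, PySem.List.pyGet?_natCast]
  simp only [Nat.cast_lt]

theorem colloop_getElem (x : List Int) (C R c : Nat) (hc : c < C)
    (y : List (Option Int)) (hy : y.length = R * C) (r : Nat) (hr : r ≤ R)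
    {i j : Nat} (hi : i < C) (hj : j < R) :
    ((List.range r).foldl
        (fun y j => if c * R + j < x.length then y.set (j * C + c) x[c * R + j]? else y) y)[j * C + i]? =
      if i = c ∧ j < r ∧ c * R + j < x.length then some x[c * R + j]? else y[j * C + i]? := by
  revert hr
  induction r with
  | zero =>
    intro _
    simp only [List.range_zero, List.foldl_nil]
    rw [if_neg (by rintro ⟨-, h2, -⟩; omega)]
  | succ r ih =>
    intro hr
    rw [List.range_succ, List.foldl_append, List.foldl_cons, List.foldl_nil]
    have hprevlen : ((List.range r).foldl
        (fun y j => if c * R + j < x.length then y.set (j * C + c) x[c * R + j]? else y) y).length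
        = R * C := by
      rw [foldl_length_eq _ _ _ (fun y' b => by split <;> simp)]
      exact hy
    by_cases hcnd : c * R + r < x.length
    · rw [if_pos hcnd, List.getElem?_set]
      by_cases heq : r * C + c = j * C + i
      · obtain ⟨hjr, hic⟩ := (idx_inj hc hi).mp heq
        subst hjr; subst hic
        rw [if_pos rfl, if_pos (by rw [hprevlen]; exact idx_lt hc (by omega)),
          if_pos ⟨rfl, by omega, hcnd⟩]
      · rw [if_neg heq, ih (by omega)]
        have hne : ¬(i = c ∧ j = r) := by rintro ⟨rfl, rfl⟩; exact heq rfl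
        by_cases h1 : i = c
        · subst h1
          by_cases h2 : j < r
          · simp [h2, show j < r + 1 by omega]
          · have hne2 : j ≠ r := fun hh => hne ⟨rfl, hh⟩
            simp [h2, show ¬ j < r + 1 by omega]
        · simp [h1]
    · rw [if_neg hcnd, ih (by omega)]
      by_cases h1 : i = c
      · subst h1
        by_cases h2 : j < r
        · simp [h2, show j < r + 1 by omega]
        · by_cases h3 : j = r
          · subst h3; simp [hcnd]
          · simp [h2, show ¬ j < r + 1 by omega]
      · simp [h1]

theorem outerloop_getElem (x : List Int) (blank : Option Int) (C R : Nat) (hC : 0 < C)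
    (c : Nat) (hc : c ≤ C) {i j : Nat} (hi : i < C) (hj : j < R) :
    ((List.range c).foldl
        (fun y i => (List.range R).foldl
          (fun y j => if i * R + j < x.length then y.set (j * C + i) x[i * R + j]? else y) y)
        (List.replicate  (C * R) blank))[j * C + i]? =
      if i < c ∧ i * R + j < x.length then some x[i * R + j]? else some blank := by
  revert hc
  induction c with
  | zero =>
    intro _
    simp only [List.range_zero, List.foldl_nil]
    rw [List.getElem?_replicate,
      if_pos (by rw [Nat.mul_comm C R]; exact idx_lt hi hj),
      if_neg (by rintro ⟨h1, -⟩; exact Nat.not_lt_zero i h1)]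
  | succ c ihc =>
    intro hc
    rw [List.range_succ, List.foldl_append, List.foldl_cons, List.foldl_nil]
    have hpres : ∀ (y : List (Option Int)) (b : Nat),
        ((fun y i => (List.range R).foldl
          (fun y j => if i * R + j < x.length then y.set (j * C + i) x[i * R + j]? else y) y) y b).length
        = y.length := by
      intro y b
      exact foldl_length_eq _ _ _ (fun y' b' => by split <;> simp)
    have hprev : ((List.range c).foldl
        (fun y i => (List.range R).foldl
          (fun y j => if i * R + j < x.length then y.set (j * C + i) x[i * R + j]? else y) y)
        (List.replicate (C * R) blank)).length = R * C := by
      rw [foldl_length_eq _ _ _ hpres, List.length_replicate, Nat.mul_comm]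
    rw [colloop_getElem x C R c (by omega) _ hprev R (le_refl R) hi hj]
    rw [ihc (by omega)]
    by_cases h1 : i = c
    · subst h1
      by_cases h2 : i * R + j < x.length
      · simp [hj, h2]
      · simp [h2]
    · by_cases h2 : i < c
      · simp [h1, h2, show i < c + 1 by omega]
      · simp [h1, h2, show ¬ i < c + 1 by omega]

theorem gridify_eq_target (x : List Int) (nc : Int) (blank : Option Int) (h : 0 < nc) :
    gridify x nc blank =
      gridTarget x blank (-(PySem.Int.floordiv (-(x.length : Int)) nc)).toNat nc.toNat := by
  obtain ⟨R, C, hR, hC, hRC, hCpos, hRlen⟩ := ceil_facts x nc h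
  have eR : (-(PySem.Int.floordiv (-(x.length : Int)) nc)).toNat = R := by
    rw [← hR, Int.toNat_natCast]
  have eC : nc.toNat = C := by rw [← hC, Int.toNat_natCast]
  rw [eR, eC, gridify_pos x nc blank h R C hR hC]
  apply List.ext_getElem?
  intro k
  rcases Nat.lt_or_ge k (R * C) with hk | hk
  · have hi : k % C < C := Nat.mod_lt _ hCpos
    have hj : k / C < R := (Nat.div_lt_iff_lt_mul hCpos).mpr hk
    have hkeq : (k / C) * C + k % C = k := by
      have := Nat.div_add_mod k C
      calc (k / C) * C + k % C = C * (k / C) + k % C := by ring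
        _ = k := this
    rw [← hkeq]
    rw [outerloop_getElem x blank C R hCpos C (le_refl C) hi hj,
        gridTarget_getElem x blank R C hi hj]
    simp only [hi, true_and]
    split_ifs <;> rfl
  · have hlen1 : ((List.range C).foldl
        (fun y i => (List.range R).foldl
          (fun y j => if i * R + j < x.length then y.set (j * C + i) x[i * R + j]? else y) y)
        (List.replicate (C * R) blank)).length = C * R := by
      rw [foldl_length_eq _ _ _
        (fun y b => foldl_length_eq _ _ _ (fun y' b' => by split <;> simp)),
        List.length_replicate]
    rw [List.getElem?_eq_none (by rw [hlen1, Nat.mul_comm]; omega),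
        List.getElem?_eq_none (by rw [gridTarget_length]; omega)]

-- ===== B-side =====

def maxLen (cols : List (List Int)) : Nat := (cols.map List.length).foldr max 0

theorem maxLen_eq_zero_iff (cols : List (List Int)) :
    maxLen cols = 0 ↔ cols.all List.isEmpty = true := by
  induction cols with
  | nil => simp [maxLen]
  | cons c cs ih =>
    simp only [maxLen, List.map_cons, List.foldr_cons, List.all_cons, Bool.and_eq_true,
      Nat.max_eq_zero_iff] at *
    rw [ih]
    simp

theorem maxLen_tail (cols : List (List Int)) :
    maxLen (cols.map List.tail) = maxLen cols - 1 := by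
  induction cols with
  | nil => simp [maxLen]
  | cons c cs ih =>
    simp only [maxLen, List.map_cons, List.foldr_cons] at *
    rw [ih, List.length_tail]
    omega

theorem le_maxLen_of_mem {c : List Int} {cols : List (List Int)} (h : c ∈ cols) :
    c.length ≤ maxLen cols := by
  induction cols with
  | nil => simp at h
  | cons d ds ih =>
    rcases List.mem_cons.mp h with rfl | h'
    · exact Nat.le_max_left _ _
    · exact le_trans (ih h') (Nat.le_max_right _ _)

theorem maxLen_le {cols : List (List Int)} {m : Nat} (h : ∀ c ∈ cols, c.length ≤ m) :
    maxLen cols ≤ m := by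
  induction cols with
  | nil => simp [maxLen]
  | cons d ds ih =>
    simp only [maxLen, List.map_cons, List.foldr_cons]
    exact Nat.max_le.mpr ⟨h d (by simp), ih (fun c hc => h c (List.mem_cons_of_mem _ hc))⟩

theorem zipLongestFlat_eq (blank : Option Int) (cols : List (List Int)) :
    zipLongestFlat blank cols =
      (List.range (maxLen cols)).flatMap
        (fun j => cols.map (fun col => if j < col.length then col[j]? else blank)) := by
  generalize hM : maxLen cols = M
  induction M generalizing cols with
  | zero =>
    rw [zipLongestFlat, dif_pos ((maxLen_eq_zero_iff cols).mp hM)]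
    simp
  | succ M ih =>
    have hne : ¬ cols.all List.isEmpty = true := by
      intro hall
      rw [(maxLen_eq_zero_iff cols).mpr hall] at hM
      omega
    rw [zipLongestFlat, dif_neg hne]
    have htails : maxLen (cols.map List.tail) = M := by
      rw [maxLen_tail, hM]
      omega
    rw [ih _ htails, List.range_succ_eq_map, List.flatMap_cons, List.flatMap_map]
    congr 1
    · apply List.map_congr_left
      intro c _
      cases c <;> simp
    · congr 1
      funext j
      rw [List.map_map]
      apply List.map_congr_left
      intro c _
      cases c with
      | nil => simp
      | cons a t => simp [Nat.succ_eq_add_one]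

theorem gridify_alt_eq_target (x : List Int) (nc : Int) (blank : Option Int) (h : 0 < nc) :
    gridify_alt x nc blank =
      gridTarget x blank (-(PySem.Int.floordiv (-(x.length : Int)) nc)).toNat nc.toNat := by
  obtain ⟨R, C, hR, hC, hRC, hCpos, hRlen⟩ := ceil_facts x nc h
  have eR : (-(PySem.Int.floordiv (-(x.length : Int)) nc)).toNat = R := by
    rw [← hR, Int.toNat_natCast]
  have eC : nc.toNat = C := by rw [← hC, Int.toNat_natCast]
  rw [eR, eC]
  simp only [gridify_alt]
  rw [← hR, ← hC, PySem.List.pyRange_one]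
  have e0 : (((C : Int)) - 0).toNat = C := by simp
  rw [e0, List.map_map, zipLongestFlat_eq]
  have hcols : (List.range C).map ((fun i => PySem.List.slice x (some (i * (R : Int))) (some ((i + 1) * (R : Int)))) ∘ (fun k : Nat => (0 : Int) + (k : Nat))) =
      (List.range C).map (fun k => (x.drop (k * R)).take R) := by
    apply List.map_congr_left
    intro k _
    simp only [Function.comp]
    have e1 : ((0 : Int) + (k : Int)) * (R : Int) = ((k * R : Nat) : Int) := by push_cast; ring
    have e2 : ((0 : Int) + (k : Int) + 1) * (R : Int) = ((k * R : Nat) : Int) + ((R : Nat) : Int) := by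
      push_cast; ring
    rw [e1, e2, PySem.List.slice_natCast_add]
  rw [hcols]
  have hmax : maxLen ((List.range C).map (fun k => (x.drop (k * R)).take R)) = R := by
    apply le_antisymm
    · apply maxLen_le
      intro c hcmem
      obtain ⟨k, _, rfl⟩ := List.mem_map.mp hcmem
      simp [List.length_take]
    · rcases Nat.eq_zero_or_pos R with h0 | hpos
      · omega
      · have hRn := hRlen hpos
        have hmem : x.take R ∈ (List.range C).map (fun k => (x.drop (k * R)).take R) :=
          List.mem_map.mpr ⟨0, List.mem_range.mpr hCpos, by simp⟩
        calc R = (x.take R).length := by rw [List.length_take]; omega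
          _ ≤ _ := le_maxLen_of_mem hmem
  rw [hmax]
  unfold gridTarget
  rw [List.flatMap_def, List.flatMap_def]
  apply congrArg
  apply List.map_congr_left
  intro j hjmem
  have hj : j < R := List.mem_range.mp hjmem
  rw [List.map_map]
  apply List.map_congr_left
  intro i _
  simp only [Function.comp]
  have hlen : ((x.drop (i * R)).take R).length = min R (x.length - i * R) := by
    simp [List.length_take]
  by_cases hcnd : i * R + j < x.length
  · have hjlt : j < ((x.drop (i * R)).take R).length := by
      rw [hlen]
      generalize i * R = a at hcnd ⊢
      omega
    rw [if_pos hjlt, if_pos hcnd, List.getElem?_take, if_pos hj, List.getElem?_drop]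
  · have hjge : ¬ j < ((x.drop (i * R)).take R).length := by
      rw [hlen]
      generalize i * R = a at hcnd ⊢
      omega
    rw [if_neg hjge, if_neg hcnd]

-- ===== negative nc =====

theorem gridify_neg (x : List Int) (nc : Int) (blank : Option Int) (h : nc < 0) :
    gridify x nc blank = [] := by
  simp only [gridify]
  rw [PySem.List.pyRange_one_eq_nil h.le]
  rw [Int.toNat_of_nonpos h.le]
  simp

theorem gridify_alt_neg (x : List Int) (nc : Int) (blank : Option Int) (h : nc < 0) :
    gridify_alt x nc blank = [] := by
  simp only [gridify_alt]
  rw [PySem.List.pyRange_one_eq_nil h.le]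
  rw [zipLongestFlat]
  simp

-- ===== VERDICT (by name: the statement is the Claim_ definition above) =====
theorem gridify_spec : Claim_equal_gridify := by
  intro x nc blank _ hpre
  unfold Spec_gridify
  rcases lt_or_gt_of_ne hpre with hneg | hpos
  · rw [gridify_neg x nc blank hneg, gridify_alt_neg x nc blank hneg]
  · rw [gridify_eq_target x nc blank hpos, gridify_alt_eq_target x nc blank hpos]
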